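-- pv_equiv track=rewrite | github.com/Robtom5/AoC2020 | day05.py | recur
-- ===== SOURCE A (Python) =====
-- def recur(possible_values, instructions, upper_char, lower_char):
--     len_possibles = len(possible_values)
--     if len_possibles == 1:
--         return possible_values[0]
--     half = int(len_possibles/2)
--     if instructions[0] == upper_char:
--         return recur(possible_values[half:], instructions[1:], upper_char, lower_char)
--     else:
--         return recur(possible_values[:half], instructions[1:], upper_char, lower_char)
-- ===== SOURCE B (Python) =====
-- def recur(possible_values, instructions, upper_char, lower_char):
--     # Single pass over the instruction characters keeping an (offset, size)
--     # window into the original list: no slicing, no recursion; stops once the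
--     # window is a single element and indexes the list directly.
--     lo, size = 0, len(possible_values)
--     for ch in instructions:
--         if size > 1:
--             half = size // 2
--             if ch == upper_char:
--                 lo, size = lo + half, size - half
--             else:
--                 size = half
--         else:
--             break
--     return possible_values[lo]
-- ===== Notes on version B (the rewrite author's own statement) =====
-- stated objective: faster
-- what changed: Replaced the recursive list/string slicing (a fresh copy of the list slice and of the remaining instruction string at every level) with one flat loop over the instruction characters maintaining an (offset, size) window, stopping as soon as the window is a single element and indexing the original list directly.
import Mathlib
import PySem

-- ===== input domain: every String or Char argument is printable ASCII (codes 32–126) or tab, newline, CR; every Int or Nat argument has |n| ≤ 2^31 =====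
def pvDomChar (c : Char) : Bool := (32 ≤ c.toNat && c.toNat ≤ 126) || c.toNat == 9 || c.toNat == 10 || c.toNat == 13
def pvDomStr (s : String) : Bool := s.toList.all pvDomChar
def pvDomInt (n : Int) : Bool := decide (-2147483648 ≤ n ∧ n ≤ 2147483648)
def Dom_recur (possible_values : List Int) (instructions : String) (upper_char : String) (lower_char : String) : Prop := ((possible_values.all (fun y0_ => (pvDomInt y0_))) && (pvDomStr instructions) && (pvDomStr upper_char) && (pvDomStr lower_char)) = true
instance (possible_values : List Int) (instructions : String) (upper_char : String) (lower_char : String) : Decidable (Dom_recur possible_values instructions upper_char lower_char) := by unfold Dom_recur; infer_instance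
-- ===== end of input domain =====

-- B replaces A's recursive list/string slicing by one flat fold over the
-- instruction characters that keeps an (offset, size) window and indexes once.

-- ===== PORT A =====
-- literal port of A's recursion; strings handled as their char lists
-- (instructions[0] == upper_char compares the 1-char string to upper_char;
--  int(len/2) is exact Nat halving since lengths are nonnegative and well below 2^53).
def recurAux (u l : List Char) (pv : List Int) (instr : List Char) : Int :=
  if pv.length = 1 then
    (PySem.List.pyGet? pv 0).getD 0          -- possible_values[0]; in range here
  else
    match instr with
    | [] => 0                                 -- instructions[0] raises IndexError; outside Pre_recur
    | c :: rest =>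
      let half := pv.length / 2               -- half = int(len_possibles/2)
      if [c] = u then
        recurAux u l (PySem.List.slice pv (some (half : Int)) none) rest   -- possible_values[half:]
      else
        recurAux u l (PySem.List.slice pv none (some (half : Int))) rest   -- possible_values[:half]
  termination_by instr.length
  decreasing_by all_goals simp

def recur (possible_values : List Int) (instructions : String) (upper_char : String) (lower_char : String) : Int :=
  recurAux upper_char.toList lower_char.toList possible_values instructions.toList

-- ===== PORT B =====
-- literal port of Source B: the for-loop body as a fold step over (lo, size).
def recurAltStep (u : List Char) (st : Nat × Nat) (c : Char) : Nat × Nat :=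
  if 1 < st.2 then
    let half := st.2 / 2
    if [c] = u then (st.1 + half, st.2 - half) else (st.1, half)
  else st

-- the 'break' exits once size ≤ 1; since the step is the identity there, folding
-- over the remaining characters is the same state, so the loop is ported as a foldl.
def recur_alt (possible_values : List Int) (instructions : String) (upper_char : String) (lower_char : String) : Int :=
  let st := instructions.toList.foldl (recurAltStep upper_char.toList) (0, possible_values.length)
  (PySem.List.pyGet? possible_values (st.1 : Int)).getD 0   -- possible_values[lo]

-- ===== PRECONDITION & SPEC =====
-- the weighted count Σ 2^i · [instructions[i] == upper_char] over the instruction chars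
def upperWeight (u : List Char) (instr : List Char) : Nat :=
  ∑ i ∈ Finset.range instr.length, if instr[i]?.map (fun c => [c]) = some u then 2 ^ i else 0

-- Pre_ holds EXACTLY where A returns (it excludes only the IndexError cases):
-- A raises iff the list is empty, or the data-dependent narrowing path runs out of
-- instruction characters, which happens iff n + Σ 2^i·[instr[i]==upper] ≥ 2^(k+1).
def Pre_recur (possible_values : List Int) (instructions : String) (upper_char : String) (lower_char : String) : Prop :=
  possible_values ≠ [] ∧
    possible_values.length + upperWeight upper_char.toList instructions.toList
      < 2 * 2 ^ instructions.toList.length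
instance (possible_values : List Int) (instructions : String) (upper_char : String) (lower_char : String) : Decidable (Pre_recur possible_values instructions upper_char lower_char) := by unfold Pre_recur; infer_instance

def pvWitness_recur : List Int × String × String × String := ([10, 20, 30, 40], "ab", "a", "b")

def Spec_recur (possible_values : List Int) (instructions : String) (upper_char : String) (lower_char : String) (out : Int) : Prop := out = recur_alt possible_values instructions upper_char lower_char
instance (possible_values : List Int) (instructions : String) (upper_char : String) (lower_char : String) (out : Int) : Decidable (Spec_recur possible_values instructions upper_char lower_char out) := by unfold Spec_recur; infer_instance

-- ===== CLAIM =====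
def Claim_equal_recur : Prop := ∀ (possible_values : List Int) (instructions : String) (upper_char : String) (lower_char : String), Dom_recur possible_values instructions upper_char lower_char → Pre_recur possible_values instructions upper_char lower_char → Spec_recur possible_values instructions upper_char lower_char (recur possible_values instructions upper_char lower_char)

-- ===== LEMMAS AND PROOFS =====

lemma upperWeight_cons (u : List Char) (c : Char) (rest : List Char) :
    upperWeight u (c :: rest) = (if [c] = u then 1 else 0) + 2 * upperWeight u rest := by
  unfold upperWeight
  rw [List.length_cons, Finset.sum_range_succ']
  simp only [List.getElem?_cons_succ, List.getElem?_cons_zero, Option.map_some, pow_succ]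
  rw [Finset.mul_sum]
  simp [mul_comm, Finset.sum_ite, Option.map]
  omega

-- once the window has size ≤ 1 the fold step is the identity
lemma fold_frozen (u : List Char) (instr : List Char) (lo size : Nat) (h : size ≤ 1) :
    instr.foldl (recurAltStep u) (lo, size) = (lo, size) := by
  induction instr with
  | nil => rfl
  | cons c rest ih => simp [List.foldl, recurAltStep, Nat.not_lt.mpr h, ih]

-- reading element 0 of the window pv[lo : lo+1] is reading pv[lo]
lemma seg_get_zero (pv : List Int) (lo : Nat) :
    (PySem.List.pyGet? ((pv.drop lo).take 1) 0).getD 0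
      = (PySem.List.pyGet? pv (lo : Int)).getD 0 := by
  rw [PySem.List.pyGet?_zero, PySem.List.pyGet?_natCast, List.getElem?_take,
    if_pos (by omega : (0:Nat) < 1), List.getElem?_drop]
  norm_num

-- Invariant: A's recursion on the slice pv[lo : lo+size] returns pv[lo'] where lo'
-- is the offset B's fold computes, provided the exact termination condition holds.
lemma recurAux_eq_fold (u l : List Char) (pv : List Int) :
    ∀ (instr : List Char) (lo size : Nat), 1 ≤ size → lo + size ≤ pv.length →
      size + upperWeight u instr < 2 * 2 ^ instr.length →
      recurAux u l ((pv.drop lo).take size) instr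
        = (PySem.List.pyGet? pv (((instr.foldl (recurAltStep u) (lo, size)).1 : Nat) : Int)).getD 0 := by
  intro instr
  induction instr with
  | nil =>
    intro lo size h1 hle hcond
    have hsz : size = 1 := by simp [upperWeight] at hcond; omega
    subst hsz
    have hlen : ((pv.drop lo).take 1).length = 1 := by
      simp [List.length_take, List.length_drop]; omega
    rw [recurAux, if_pos hlen, List.foldl_nil]
    exact seg_get_zero pv lo
  | cons c rest ih =>
    intro lo size h1 hle hcond
    have hlen : ((pv.drop lo).take size).length = size := by
      simp [List.length_take, List.length_drop]; omega
    by_cases hsz1 : size = 1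
    · subst hsz1
      rw [recurAux, if_pos (by rw [hlen])]
      rw [show (c :: rest).foldl (recurAltStep u) (lo, 1)
            = rest.foldl (recurAltStep u) (lo, 1) by
          simp [List.foldl, recurAltStep]]
      rw [fold_frozen u rest lo 1 le_rfl]
      exact seg_get_zero pv lo
    · have h2 : 2 ≤ size := by omega
      rw [recurAux, if_neg (by rw [hlen]; omega)]
      simp only [hlen, List.foldl_cons, recurAltStep, if_pos (by omega : 1 < size)]
      rw [upperWeight_cons] at hcond
      by_cases hc : [c] = u
      · -- upper branch: window becomes (lo + half, size - half)
        rw [if_pos hc, PySem.List.slice_from_natCast]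
        have hseg : ((pv.drop lo).take size).drop (size / 2)
            = (pv.drop (lo + size / 2)).take (size - size / 2) := by
          rw [List.drop_take, List.drop_drop]
        rw [hseg]
        have := ih (lo + size / 2) (size - size / 2) (by omega) (by omega)
          (by simp [hc] at hcond; omega)
        simpa [hc] using this
      · -- lower branch: window becomes (lo, size / 2)
        rw [if_neg hc, PySem.List.slice_to_natCast]
        have hseg : ((pv.drop lo).take size).take (size / 2)
            = (pv.drop lo).take (size / 2) := by
          rw [List.take_take]; congr 1; omega
        rw [hseg]
        have := ih lo (size / 2) (by omega) (by omega)
          (by simp [hc] at hcond; omega)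
        simpa [hc] using this

-- ===== VERDICT =====
theorem recur_spec : Claim_equal_recur := by
  intro pv instr u l _hdom hpre
  unfold Spec_recur recur recur_alt
  have hpos : 0 < pv.length := List.length_pos_of_ne_nil hpre.1
  have := recurAux_eq_fold u.toList l.toList pv instr.toList 0 pv.length hpos (by omega)
    (by simpa using hpre.2)
  simpa using this
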